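-- pv_equiv track=rewrite | github.com/renanbabinski/Seguranca-e-Auditoria-de-Sistemas | Cifra_de_Substituição Simples/gerar_padrao_palavras.py | gera_padrao_palavra
-- ===== SOURCE A (Python) =====
-- def gera_padrao_palavra(palavra):
--     # Retorna uma string no formato do padrao da palavra
--     # Exemplo  '0.1.2.3.4.1.2.3.5.6' para 'DUSTBUSTER'
--     palavra = palavra.upper()
--     proximo_numero = 0
--     numero_letras = {}
--     padrao_palavra = []
--
--     for letra in palavra:
--         if letra not in numero_letras:
--             numero_letras[letra] = str(proximo_numero)
--             proximo_numero += 1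
--         padrao_palavra.append(numero_letras[letra])
--     return '.'.join(padrao_palavra)
-- ===== SOURCE B (Python) =====
-- def gera_padrao_palavra(palavra):
--     # B: no numbering table. A letter's number in the first-occurrence
--     # numbering equals the count of DISTINCT letters occurring strictly
--     # before its first occurrence, so emit that closed form per character.
--     up = palavra.upper()
--     return '.'.join(str(len(set(up[:up.index(c)]))) for c in up)
-- ===== Notes on version B (the rewrite author's own statement) =====
-- stated objective: alternative
-- what changed: B removes A's incremental counter+dict numbering entirely: each character's number is computed as a closed form, the count of distinct letters in the prefix strictly before that character's first occurrence (len(set(up[:up.index(c)]))).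
import Mathlib
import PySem

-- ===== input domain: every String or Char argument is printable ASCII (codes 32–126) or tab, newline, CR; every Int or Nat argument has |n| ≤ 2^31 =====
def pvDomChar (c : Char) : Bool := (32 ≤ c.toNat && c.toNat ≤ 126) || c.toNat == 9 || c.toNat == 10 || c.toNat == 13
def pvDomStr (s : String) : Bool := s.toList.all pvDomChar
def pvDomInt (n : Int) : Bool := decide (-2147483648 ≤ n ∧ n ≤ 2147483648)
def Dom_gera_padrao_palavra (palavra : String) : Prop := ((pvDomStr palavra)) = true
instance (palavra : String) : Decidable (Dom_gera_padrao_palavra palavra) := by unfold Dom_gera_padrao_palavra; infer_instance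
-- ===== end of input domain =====

-- B removes A's incremental counter+dict numbering: each character's number is
-- computed as a closed form, the count of distinct letters strictly before its
-- first occurrence (objective: alternative, not faster).

-- ===== PORT A =====
-- state = (proximo_numero, numero_letras, padrao_palavra)
def gera_padrao_palavra (palavra : String) : String :=
  let res := (PySem.Str.upper palavra).toList.foldl
    (fun (st : Int × PySem.Dict Char String × List String) letra =>
      let st' :=
        if st.2.1.contains letra then st
        else (st.1 + 1, st.2.1.insert letra (PySem.Int.toStr st.1), st.2.2)
      -- numero_letras[letra]: the key is always present here, so getD's default is unreachable
      (st'.1, st'.2.1, st'.2.2 ++ [st'.2.1.getD letra ""]))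
    (0, PySem.Dict.empty, [])
  PySem.Str.join "." res.2.2

-- ===== PORT B =====
def gera_padrao_palavra_alt (palavra : String) : String :=
  let up := (PySem.Str.upper palavra).toList
  -- up.index(c): c is always a member of up, so getD's default is unreachable
  PySem.Str.join "."
    (up.map (fun c =>
      PySem.Int.toStr
        (PySem.Set.len (PySem.Set.ofList (up.take ((PySem.List.index? up c).getD 0))))))

-- ===== PRECONDITION & SPEC =====
def Spec_gera_padrao_palavra (palavra : String) (out : String) : Prop := out = gera_padrao_palavra_alt palavra
instance (palavra : String) (out : String) : Decidable (Spec_gera_padrao_palavra palavra out) := by unfold Spec_gera_padrao_palavra; infer_instance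

-- ===== CLAIM (what is proved, stated in full; the proofs are below) =====
def Claim_equal_gera_padrao_palavra : Prop := ∀ (palavra : String), Dom_gera_padrao_palavra palavra → Spec_gera_padrao_palavra palavra (gera_padrao_palavra palavra)

-- ===== LEMMAS AND PROOFS =====

-- A's value for a letter: its index in the first-occurrence dedup of the word
def pvF (xs : List Char) (c : Char) : String :=
  PySem.Int.toStr ((PySem.List.index? (PySem.List.dedup xs) c).getD 0 : Nat)

-- B's value for a letter: distinct-count of the prefix before its first occurrence
def pvG (xs : List Char) (c : Char) : String :=
  PySem.Int.toStr
    (PySem.Set.len (PySem.Set.ofList (xs.take ((PySem.List.index? xs c).getD 0))))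

-- A's loop body, named for the lemmas
def pvStepA (st : Int × PySem.Dict Char String × List String) (letra : Char) :
    Int × PySem.Dict Char String × List String :=
  let st' :=
    if st.2.1.contains letra then st
    else (st.1 + 1, st.2.1.insert letra (PySem.Int.toStr st.1), st.2.2)
  (st'.1, st'.2.1, st'.2.2 ++ [st'.2.1.getD letra ""])

lemma pvDedup_snoc (pre : List Char) (c : Char) :
    PySem.List.dedup (pre ++ [c]) = PySem.Set.add (PySem.List.dedup pre) c := by
  simp [PySem.List.dedup, PySem.Set.ofList, List.foldl_append]

lemma pvDedup_snoc_mem (pre : List Char) (c : Char) (h : c ∈ pre) :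
    PySem.List.dedup (pre ++ [c]) = PySem.List.dedup pre := by
  rw [pvDedup_snoc]
  unfold PySem.Set.add
  rw [(PySem.Set.contains_iff _ _).mpr ((PySem.List.mem_dedup _ _).mpr h)]
  simp

lemma pvDedup_snoc_not_mem (pre : List Char) (c : Char) (h : c ∉ pre) :
    PySem.List.dedup (pre ++ [c]) = PySem.List.dedup pre ++ [c] := by
  rw [pvDedup_snoc]
  unfold PySem.Set.add
  have hcf : PySem.Set.contains (PySem.List.dedup pre) c = false := by
    rcases hx : PySem.Set.contains (PySem.List.dedup pre) c with _ | _
    · rfl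
    · exact absurd ((PySem.List.mem_dedup _ _).mp ((PySem.Set.contains_iff _ _).mp hx)) h
  rw [hcf]
  simp

lemma pvDedup_prefix (l pre : List Char) :
    ∃ t, PySem.List.dedup (pre ++ l) = PySem.List.dedup pre ++ t := by
  induction l generalizing pre with
  | nil => exact ⟨[], by simp⟩
  | cons c l ih =>
    obtain ⟨t, ht⟩ := ih (pre ++ [c])
    rw [show pre ++ c :: l = (pre ++ [c]) ++ l by simp] at *
    by_cases hc : c ∈ pre
    · exact ⟨t, by rw [ht, pvDedup_snoc_mem pre c hc]⟩
    · exact ⟨c :: t, by rw [ht, pvDedup_snoc_not_mem pre c hc]; simp⟩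

-- A's per-letter value is stable under extending the word past the letter's first occurrence
lemma pvF_stable (pre l : List Char) (c : Char) (h : c ∈ pre) :
    pvF (pre ++ l) c = pvF pre c := by
  obtain ⟨t, ht⟩ := pvDedup_prefix l pre
  unfold pvF
  rw [ht, PySem.List.index?_append_of_mem t ((PySem.List.mem_dedup _ _).mpr h)]

lemma pvF_snoc_not_mem (pre : List Char) (c : Char) (h : c ∉ pre) :
    pvF (pre ++ [c]) c = PySem.Int.toStr ((PySem.List.dedup pre).length : Nat) := by
  have hc : c ∉ PySem.List.dedup pre := fun hm => h ((PySem.List.mem_dedup _ _).mp hm)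
  unfold pvF
  rw [pvDedup_snoc_not_mem pre c h, PySem.List.index?_append_singleton_self _ c hc]
  rfl

-- main loop invariant: A's accumulated output is the pvF-image of the processed prefix
lemma pvLoopA (l : List Char) : ∀ (pre : List Char) (n : Int)
    (d : PySem.Dict Char String) (out : List String),
    n = ((PySem.List.dedup pre).length : Int) →
    (∀ c, d.contains c = decide (c ∈ pre)) →
    (∀ c ∈ pre, d.getD c "" = pvF pre c) →
    (l.foldl pvStepA (n, d, out)).2.2 = out ++ l.map (pvF (pre ++ l)) := by
  induction l with
  | nil => intro pre n d out _ _ _; simp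
  | cons c l ih =>
    intro pre n d out hn hc hg
    by_cases hm : c ∈ pre
    · have hstep : pvStepA (n, d, out) c = (n, d, out ++ [d.getD c ""]) := by
        simp [pvStepA, hc c, hm]
      rw [List.foldl_cons, hstep,
        ih (pre ++ [c]) n d (out ++ [d.getD c ""])
          (by rw [hn, pvDedup_snoc_mem pre c hm])
          (by intro c'
              rw [hc c']
              exact decide_eq_decide.mpr
                ⟨fun h => List.mem_append.mpr (Or.inl h),
                 fun h => by rcases List.mem_append.mp h with h | h
                             · exact h
                             · exact (List.mem_singleton.mp h) ▸ hm⟩)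
          (by intro c' hc'
              have hc'' : c' ∈ pre := by
                rcases List.mem_append.mp hc' with h | h
                · exact h
                · simpa using (List.mem_singleton.mp h) ▸ hm
              rw [hg c' hc'', pvF_stable pre [c] c' hc''])]
      have : pvF (pre ++ c :: l) c = d.getD c "" := by
        rw [hg c hm, ← pvF_stable pre (c :: l) c hm]
      simp [this, show pre ++ [c] ++ l = pre ++ c :: l by simp]
    · have hcontains : d.contains c = false := by rw [hc c]; simp [hm]
      have hstep : pvStepA (n, d, out) c =
          (n + 1, d.insert c (PySem.Int.toStr n),
           out ++ [PySem.Int.toStr n]) := by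
        simp [pvStepA, hcontains, PySem.Dict.getD_insert_self]
      rw [List.foldl_cons, hstep,
        ih (pre ++ [c]) (n + 1) (d.insert c (PySem.Int.toStr n))
          (out ++ [PySem.Int.toStr n])
          (by rw [pvDedup_snoc_not_mem pre c hm, hn]; simp)
          (by intro c'
              rw [PySem.Dict.contains_insert, hc c']
              by_cases h : c' = c <;> simp [h])
          (by intro c' hc'
              rcases List.mem_append.mp hc' with h | h
              · have hne : c' ≠ c := fun he => hm (he ▸ h)
                rw [PySem.Dict.getD_insert_of_ne _ _ _ hne, hg c' h,
                  pvF_stable pre [c] c' h]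
              · rw [List.mem_singleton.mp h, PySem.Dict.getD_insert_self,
                  pvF_snoc_not_mem pre c hm, hn])]
      have hv : pvF (pre ++ c :: l) c = PySem.Int.toStr n := by
        rw [show pre ++ c :: l = (pre ++ [c]) ++ l by simp,
          pvF_stable (pre ++ [c]) l c (by simp),
          pvF_snoc_not_mem pre c hm, hn]
      simp [hv, show pre ++ [c] ++ l = pre ++ c :: l by simp]

-- bridge: for a member c of xs, A's index-in-dedup equals B's distinct-count of
-- the prefix before c's first occurrence
lemma pvF_eq_pvG (xs : List Char) (c : Char) (h : c ∈ xs) : pvF xs c = pvG xs c := by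
  obtain ⟨k, hk⟩ := Option.isSome_iff_exists.mp ((PySem.List.index?_isSome_iff xs c).mpr h)
  obtain ⟨pre, suf, hxs, hlen, hnc⟩ := (PySem.List.index?_eq_some_iff xs c k).mp hk
  have htake : xs.take k = pre := by
    rw [hxs, ← hlen, List.take_left]
  obtain ⟨t, ht⟩ := pvDedup_prefix suf (pre ++ [c])
  have hxsd : PySem.List.dedup xs = (PySem.List.dedup pre ++ [c]) ++ t := by
    rw [hxs, show pre ++ c :: suf = (pre ++ [c]) ++ suf by simp, ht,
      pvDedup_snoc_not_mem pre c hnc]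
  have hcd : c ∉ PySem.List.dedup pre := fun hm => hnc ((PySem.List.mem_dedup _ _).mp hm)
  unfold pvF pvG
  rw [hxsd, PySem.List.index?_append_of_mem t (by simp),
    PySem.List.index?_append_singleton_self _ c hcd, hk]
  simp only [Option.getD_some]
  rw [htake]
  simp [PySem.Set.len, PySem.List.dedup]

-- ===== VERDICT (by name: the statement is the Claim_ definition above) =====
theorem gera_padrao_palavra_spec : Claim_equal_gera_padrao_palavra := by
  intro palavra _
  unfold Spec_gera_padrao_palavra gera_padrao_palavra gera_padrao_palavra_alt
  have h := pvLoopA (PySem.Str.upper palavra).toList [] 0 PySem.Dict.empty []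
    (by simp [PySem.List.dedup, PySem.Set.ofList])
    (by intro c; simp)
    (by intro c hc; simp at hc)
  simp only [List.nil_append] at h
  show PySem.Str.join "."
      ((PySem.Str.upper palavra).toList.foldl pvStepA (0, PySem.Dict.empty, [])).2.2 = _
  rw [h, List.map_congr_left (fun c hc => pvF_eq_pvG ((PySem.Str.upper palavra).toList) c hc)]
  rfl
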